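-- pv_equiv track=rewrite | github.com/krzysztof-turowski/programming-contests | facebook-hacker-cup/2020-round-1/quarantine.py | get_lengths_to_root
-- ===== SOURCE A (Python) =====
-- import queue
--
-- def get_lengths_to_root(G, v, V, visited = None):
--     order, visited = [], {}
--     Q = queue.Queue()
--     Q.put((v, None))
--     while not Q.empty():
--         u, parent = Q.get()
--         if u in visited:
--             continue
--         if parent is not None:
--             order.append((u, parent))
--         visited[u] = [1 if u in V else 0, 0]
--         for w in G[u]:
--             Q.put((w, u))
--     for u, parent in order[::-1]:
--         visited[parent][0] += visited[u][0]
--         visited[parent][1] += visited[u][1] + visited[u][0]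
--     return visited[v][1]
-- ===== SOURCE B (Python) =====
-- def get_lengths_to_root(G, v, V, visited=None):
--     # Single BFS pass carrying each node's depth; the answer equals the sum of
--     # depths of the special nodes, so no edge list / reverse accumulation pass
--     # and no per-node [count, total] bookkeeping are needed.
--     depth = {}
--     total = 0
--     q = [(v, 0)]
--     i = 0
--     while i < len(q):
--         u, d = q[i]
--         i += 1
--         if u in depth:
--             continue
--         depth[u] = d
--         if u in V:
--             total += d
--         for w in G[u]:
--             q.append((w, d + 1))
--     return total
-- ===== Notes on version B (the rewrite author's own statement) =====
-- stated objective: simpler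
-- what changed: Replaces BFS-that-records-edges plus a reversed subtree-accumulation pass over per-node [count,total] pairs by a single BFS pass that carries each node's depth and directly sums the depths of the special nodes (answer = sum of BFS-tree depths of nodes in V), using a plain list cursor instead of queue.Queue.
import Mathlib
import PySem

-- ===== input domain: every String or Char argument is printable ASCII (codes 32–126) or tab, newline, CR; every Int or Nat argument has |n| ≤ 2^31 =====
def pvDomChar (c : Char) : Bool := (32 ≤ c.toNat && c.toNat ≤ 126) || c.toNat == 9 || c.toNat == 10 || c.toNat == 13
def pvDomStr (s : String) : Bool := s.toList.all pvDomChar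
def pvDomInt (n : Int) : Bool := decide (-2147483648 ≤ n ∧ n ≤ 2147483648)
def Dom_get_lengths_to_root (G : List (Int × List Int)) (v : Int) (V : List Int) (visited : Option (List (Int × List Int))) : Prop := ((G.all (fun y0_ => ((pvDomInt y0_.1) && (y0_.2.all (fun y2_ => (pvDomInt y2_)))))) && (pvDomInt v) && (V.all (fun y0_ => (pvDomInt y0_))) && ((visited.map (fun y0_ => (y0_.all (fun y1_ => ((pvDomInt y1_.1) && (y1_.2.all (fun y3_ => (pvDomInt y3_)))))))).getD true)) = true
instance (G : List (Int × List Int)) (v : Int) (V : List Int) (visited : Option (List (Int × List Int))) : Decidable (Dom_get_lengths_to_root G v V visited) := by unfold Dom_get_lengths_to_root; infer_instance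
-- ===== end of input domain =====

-- B replaces A's BFS-plus-reversed-accumulation by one BFS pass summing depths of special
-- nodes (the `visited` parameter is shadowed by both Pythons and hence ignored).

-- ===== PORT A =====
-- One phase-2 step: `visited[parent][0] += visited[u][0]; visited[parent][1] += visited[u][1] + visited[u][0]`
-- (u ≠ parent on every entry A ever appends, so the two += on the pair combine into one insert).
def pvStepA (vs : PySem.Dict Int (Int × Int)) (up : Int × Int) : PySem.Dict Int (Int × Int) :=
  let cu := vs.getD up.1 (0, 0)
  let cp := vs.getD up.2 (0, 0)
  vs.insert up.2 (cp.1 + cu.1, cp.2 + cu.2 + cu.1)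

-- A's while-loop over the FIFO queue, with fuel (the loop dequeues at most 1 + Σ|adj| items).
def pvBfsA (G : List (Int × List Int)) (V : List Int) :
    Nat → List (Int × Int) → PySem.Dict Int (Int × Int) → List (Int × Option Int) →
    List (Int × Int) × PySem.Dict Int (Int × Int)
  | 0, order, vis, _ => (order, vis)
  | _ + 1, order, vis, [] => (order, vis)
  | f + 1, order, vis, (u, par) :: Q =>
    if vis.contains u then pvBfsA G V f order vis Q
    else
      let order' := match par with | none => order | some p => order ++ [(u, p)]
      let vis' := vis.insert u ((if u ∈ V then 1 else 0 : Int), (0 : Int))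
      match (PySem.Dict.mk G).get? u with
      | none => (order', vis')  -- Python raises KeyError at `G[u]` here (excluded by Pre_)
      | some adj => pvBfsA G V f order' vis' (Q ++ adj.map fun w => (w, some u))

def get_lengths_to_root (G : List (Int × List Int)) (v : Int) (V : List Int) (visited : Option (List (Int × List Int))) : Int :=
  let r := pvBfsA G V ((G.map fun kv => kv.2.length).sum + 1) [] PySem.Dict.empty [(v, none)]
  let visF := r.1.reverse.foldl pvStepA r.2   -- `for u, parent in order[::-1]: …`
  (visF.getD v (0, 0)).2                      -- `return visited[v][1]` (KeyError impossible: v is visited first)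

-- ===== PORT B =====
-- B's while-loop: queue entries carry the depth; no order list, no second pass.
def pvBfsB (G : List (Int × List Int)) (V : List Int) :
    Nat → PySem.Dict Int Int → Int → List (Int × Int) → Int
  | 0, _, tot, _ => tot
  | _ + 1, _, tot, [] => tot
  | f + 1, dep, tot, (u, d) :: Q =>
    if dep.contains u then pvBfsB G V f dep tot Q
    else
      let dep' := dep.insert u d
      let tot' := if u ∈ V then tot + d else tot
      match (PySem.Dict.mk G).get? u with
      | none => tot'  -- Python raises KeyError at `G[u]` here (excluded by Pre_)
      | some adj => pvBfsB G V f dep' tot' (Q ++ adj.map fun w => (w, d + 1))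

def get_lengths_to_root_alt (G : List (Int × List Int)) (v : Int) (V : List Int) (visited : Option (List (Int × List Int))) : Int :=
  pvBfsB G V ((G.map fun kv => kv.2.length).sum + 1) PySem.Dict.empty 0 [(v, 0)]

-- ===== PRECONDITION & SPEC =====
-- A raises KeyError at `G[u]` exactly when some node reachable from v is not a key of G.
-- pvReach computes the reachable set as an |G|-step neighbour-set closure (a saturation of
-- the edge relation, checkable without running either port's BFS; |G| steps saturate since
-- every shortest path has at most |G| intermediate key nodes).
def pvReachStep (G : List (Int × List Int)) (S : List Int) : List Int :=
  PySem.Set.update S (S.flatMap fun x => ((PySem.Dict.mk G).get? x).getD [])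

def pvReach (G : List (Int × List Int)) (v : Int) : List Int :=
  (pvReachStep G)^[G.length] [v]

def Pre_get_lengths_to_root (G : List (Int × List Int)) (v : Int) (V : List Int) (visited : Option (List (Int × List Int))) : Prop :=
  ∀ x ∈ pvReach G v, x ∈ G.map Prod.fst
instance (G : List (Int × List Int)) (v : Int) (V : List Int) (visited : Option (List (Int × List Int))) : Decidable (Pre_get_lengths_to_root G v V visited) := by unfold Pre_get_lengths_to_root; infer_instance

def pvWitness_get_lengths_to_root : (List (Int × List Int)) × Int × List Int × (Option (List (Int × List Int))) :=
  ([(0, [1, 2]), (1, [2]), (2, [])], 0, [1, 2], none)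

def Spec_get_lengths_to_root (G : List (Int × List Int)) (v : Int) (V : List Int) (visited : Option (List (Int × List Int))) (out : Int) : Prop := out = get_lengths_to_root_alt G v V visited
instance (G : List (Int × List Int)) (v : Int) (V : List Int) (visited : Option (List (Int × List Int))) (out : Int) : Decidable (Spec_get_lengths_to_root G v V visited out) := by unfold Spec_get_lengths_to_root; infer_instance

-- ===== CLAIM (what is proved, stated in full; the proofs are below) =====
def Claim_equal_get_lengths_to_root : Prop := ∀ (G : List (Int × List Int)) (v : Int) (V : List Int) (visited : Option (List (Int × List Int))), Dom_get_lengths_to_root G v V visited → Pre_get_lengths_to_root G v V visited → Spec_get_lengths_to_root G v V visited (get_lengths_to_root G v V visited)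

-- ===== LEMMAS AND PROOFS =====

-- indicator of membership in V
def pvInd (V : List Int) (x : Int) : Int := if x ∈ V then 1 else 0

-- every entry's parent is the root v or a node of a LATER entry (order list reversed)
def pvParOK (v : Int) : List (Int × Int) → Prop
  | [] => True
  | e :: r => (e.2 = v ∨ e.2 ∈ r.map Prod.fst) ∧ pvParOK v r

-- the potential: Σ_{x ∈ S} (total x + depth x * count x)
def pvPhi (dd : Int → Int) (S : List Int) (w : PySem.Dict Int (Int × Int)) : Int :=
  (S.map fun x => (w.getD x (0, 0)).2 + dd x * (w.getD x (0, 0)).1).sum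

lemma pvParOK_mem {v : Int} : ∀ {L : List (Int × Int)}, pvParOK v L →
    ∀ e ∈ L, e.2 = v ∨ e.2 ∈ L.map Prod.fst := by
  intro L
  induction L with
  | nil => intro _ e he; cases he
  | cons a r ih =>
    intro h e he
    rcases List.mem_cons.mp he with rfl | he'
    · rcases h.1 with h1 | h1
      · exact Or.inl h1
      · exact Or.inr (List.mem_cons_of_mem _ h1)
    · rcases ih h.2 e he' with h1 | h1
      · exact Or.inl h1
      · exact Or.inr (List.mem_cons_of_mem _ h1)

lemma pvSumUpdate (f g : Int → Int) (p : Int) :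
    ∀ (S : List Int), S.Nodup → p ∈ S → (∀ x ∈ S, x ≠ p → g x = f x) →
    (S.map g).sum = (S.map f).sum + (g p - f p) := by
  intro S
  induction S with
  | nil => intro _ hp; cases hp
  | cons a t ih =>
    intro hnd hp hoff
    rcases List.mem_cons.mp hp with rfl | hpt
    · have ht : ∀ x ∈ t, g x = f x := by
        intro x hx
        exact hoff x (List.mem_cons_of_mem _ hx) (fun hxa => (List.nodup_cons.mp hnd).1 (hxa ▸ hx))
      simp only [List.map_cons, List.sum_cons]
      have : t.map g = t.map f := List.map_congr_left ht
      rw [this]; ring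
    · have ha : g a = f a := hoff a (List.mem_cons_self) (fun hap => by
        subst hap; exact (List.nodup_cons.mp hnd).1 hpt)
      simp only [List.map_cons, List.sum_cons]
      rw [ha, ih (List.nodup_cons.mp hnd).2 hpt
        (fun x hx hxp => hoff x (List.mem_cons_of_mem _ hx) hxp)]
      ring

-- one pvStepA application adds u's potential term to the sum over S (p ∈ S, S nodup)
lemma pvPhiStep (dd : Int → Int) (u p : Int) (w : PySem.Dict Int (Int × Int))
    (S : List Int) (hnd : S.Nodup) (hp : p ∈ S) (hdu : dd u = dd p + 1) :
    pvPhi dd S (pvStepA w (u, p)) =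
      pvPhi dd S w + ((w.getD u (0, 0)).2 + dd u * (w.getD u (0, 0)).1) := by
  have hstep : pvStepA w (u, p) = w.insert p
      ((w.getD p (0, 0)).1 + (w.getD u (0, 0)).1,
       (w.getD p (0, 0)).2 + (w.getD u (0, 0)).2 + (w.getD u (0, 0)).1) := rfl
  unfold pvPhi
  rw [hstep]
  rw [pvSumUpdate (fun x => (w.getD x (0, 0)).2 + dd x * (w.getD x (0, 0)).1)
      (fun x => ((w.insert p
          ((w.getD p (0, 0)).1 + (w.getD u (0, 0)).1,
           (w.getD p (0, 0)).2 + (w.getD u (0, 0)).2 + (w.getD u (0, 0)).1)).getD x (0, 0)).2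
        + dd x * ((w.insert p
          ((w.getD p (0, 0)).1 + (w.getD u (0, 0)).1,
           (w.getD p (0, 0)).2 + (w.getD u (0, 0)).2 + (w.getD u (0, 0)).1)).getD x (0, 0)).1)
      p S hnd hp (fun x _ hxp => by simp only [PySem.Dict.getD_insert_of_ne _ _ _ hxp])]
  simp only [PySem.Dict.getD_insert_self]
  rw [hdu]; ring

-- Φ-invariance of the reversed accumulation pass: folding pvStepA over Lr turns the potential
-- over {v} ∪ nodes(Lr) into the potential at the root alone.
lemma pvPhiFold (v : Int) (dd : Int → Int) :
    ∀ (Lr : List (Int × Int)) (w : PySem.Dict Int (Int × Int)),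
    (v :: Lr.map Prod.fst).Nodup → pvParOK v Lr →
    (∀ e ∈ Lr, dd e.1 = dd e.2 + 1) →
    pvPhi dd [v] (Lr.foldl pvStepA w) = pvPhi dd (v :: Lr.map Prod.fst) w := by
  intro Lr
  induction Lr with
  | nil => intro w _ _ _; rfl
  | cons e r ih =>
    intro w hnd hpar hd
    obtain ⟨u, p⟩ := e
    have hnd' : (v :: r.map Prod.fst).Nodup := by
      rcases List.nodup_cons.mp hnd with ⟨hv, hur⟩
      exact List.nodup_cons.mpr ⟨fun hvr => hv (List.mem_cons_of_mem _ hvr),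
        (List.nodup_cons.mp hur).2⟩
    have hp : p ∈ v :: r.map Prod.fst := by
      rcases hpar.1 with h1 | h1
      · have h1' : p = v := h1
        exact h1' ▸ List.mem_cons_self
      · exact List.mem_cons_of_mem _ h1
    have hdu : dd u = dd p + 1 := hd (u, p) List.mem_cons_self
    have hfold : ((u, p) :: r).foldl pvStepA w = r.foldl pvStepA (pvStepA w (u, p)) := rfl
    rw [hfold, ih (pvStepA w (u, p)) hnd' hpar.2 (fun e he => hd e (List.mem_cons_of_mem _ he)),
      pvPhiStep dd u p w _ hnd' hp hdu]
    simp only [List.map_cons, pvPhi, List.sum_cons]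
    ring

-- the joint loop invariant of the two BFS loops
structure pvInv (v : Int) (V : List Int) (order : List (Int × Int))
    (vis : PySem.Dict Int (Int × Int)) (dep : PySem.Dict Int Int) (tot : Int) : Prop where
  keys : dep.keys = v :: order.map Prod.fst
  nd : (v :: order.map Prod.fst).Nodup
  visq : ∀ x, vis.get? x = (dep.get? x).map fun _ => (pvInd V x, 0)
  d0 : dep.getD v 0 = 0
  ord : ∀ e ∈ order, dep.getD e.1 0 = dep.getD e.2 0 + 1
  par : pvParOK v order.reverse
  tots : tot = (dep.items.map fun e => pvInd V e.1 * e.2).sum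

def pvQRel (dep : PySem.Dict Int Int) (a : Int × Option Int) (b : Int × Int) : Prop :=
  a.1 = b.1 ∧ ∃ p, a.2 = some p ∧ dep.contains p = true ∧ b.2 = dep.getD p 0 + 1

-- at any stop point, A's phase 2 on the current state yields exactly B's running total
lemma pvFinalEq {v : Int} {V : List Int} {order vis dep tot}
    (h : pvInv v V order vis dep tot) :
    ((order.reverse.foldl pvStepA vis).getD v (0, 0)).2 = tot := by
  have hnd : (v :: order.reverse.map Prod.fst).Nodup := by
    rcases List.nodup_cons.mp h.nd with ⟨hv, hn⟩
    exact List.nodup_cons.mpr ⟨fun hvr => hv (by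
        rw [List.map_reverse] at hvr; exact List.mem_reverse.mp hvr),
      by rw [List.map_reverse]; exact List.nodup_reverse.mpr hn⟩
  have hfold := pvPhiFold v (fun x => dep.getD x 0) order.reverse vis hnd h.par
    (fun e he => h.ord e (List.mem_reverse.mp he))
  have hleft : pvPhi (fun x => dep.getD x 0) [v] (order.reverse.foldl pvStepA vis) =
      ((order.reverse.foldl pvStepA vis).getD v (0, 0)).2 := by
    unfold pvPhi; simp [h.d0]
  have hterm : ∀ x ∈ (v :: order.reverse.map Prod.fst),
      (vis.getD x (0, 0)).2 + dep.getD x 0 * (vis.getD x (0, 0)).1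
        = dep.getD x 0 * pvInd V x := by
    intro x hx
    have hxk : x ∈ dep.keys := by
      rw [h.keys]
      rcases List.mem_cons.mp hx with rfl | hx'
      · exact List.mem_cons_self
      · rw [List.map_reverse] at hx'
        exact List.mem_cons_of_mem _ (List.mem_reverse.mp hx')
    have hc : dep.contains x = true := (PySem.Dict.contains_iff_mem_keys _ _).mpr hxk
    have hs : (dep.get? x).isSome = true := by
      rw [← PySem.Dict.contains_eq_isSome_get?]; exact hc
    obtain ⟨dx, hdx⟩ := Option.isSome_iff_exists.mp hs
    have : vis.getD x (0, 0) = (pvInd V x, 0) := by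
      rw [PySem.Dict.getD_eq_get?_getD, h.visq x, hdx]; rfl
    rw [this]; ring
  have hperm : (v :: order.reverse.map Prod.fst).Perm dep.keys := by
    rw [h.keys, List.map_reverse]
    exact List.Perm.cons v (List.reverse_perm _)
  have hndk : dep.keys.Nodup := h.keys ▸ h.nd
  have hright : pvPhi (fun x => dep.getD x 0) (v :: order.reverse.map Prod.fst) vis = tot := by
    unfold pvPhi
    rw [List.map_congr_left hterm]
    rw [List.Perm.sum_eq (List.Perm.map _ hperm)]
    rw [h.tots, PySem.Dict.items_eq_map_keys dep hndk 0, List.map_map]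
    congr 1
    apply List.map_congr_left
    intro k hk
    have : dep.getD k 0 = dep.getD k 0 := rfl
    simp [Function.comp]
    ring
  rw [← hleft, hfold, hright]

-- helper: Forall₂ over two maps of the same list
lemma pvForall₂_map {α β γ : Type} (R : β → γ → Prop) (f : α → β) (g : α → γ) :
    ∀ (l : List α), (∀ a ∈ l, R (f a) (g a)) → List.Forall₂ R (l.map f) (l.map g) := by
  intro l
  induction l with
  | nil => intro _; exact List.Forall₂.nil
  | cons a t ih =>
    intro h
    exact List.Forall₂.cons (h a (List.mem_cons_self)) (ih fun x hx => h x (List.mem_cons_of_mem _ hx))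

-- the lockstep simulation of the two loops
lemma pvSim (G : List (Int × List Int)) (V : List Int) (v : Int) :
    ∀ (f : Nat) (order : List (Int × Int)) (vis : PySem.Dict Int (Int × Int))
      (dep : PySem.Dict Int Int) (tot : Int) (QA : List (Int × Option Int)) (QB : List (Int × Int)),
    pvInv v V order vis dep tot → List.Forall₂ (pvQRel dep) QA QB →
    (((pvBfsA G V f order vis QA).1.reverse.foldl pvStepA (pvBfsA G V f order vis QA).2).getD v (0, 0)).2
      = pvBfsB G V f dep tot QB := by
  intro f
  induction f with
  | zero => intro order vis dep tot QA QB hinv _; exact pvFinalEq hinv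
  | succ f ih =>
    intro order vis dep tot QA QB hinv hq
    cases hq with
    | nil => exact pvFinalEq hinv
    | @cons a b QA' QB' hab hq' =>
      obtain ⟨u, par⟩ := a
      obtain ⟨u', d⟩ := b
      obtain ⟨hu1, p, hpar, hpc, hd⟩ := hab
      cases hu1
      have hpar' : par = some p := hpar
      subst hpar'
      have hcont : vis.contains u = dep.contains u := by
        rw [PySem.Dict.contains_eq_isSome_get?, PySem.Dict.contains_eq_isSome_get?, hinv.visq u]
        cases dep.get? u <;> rfl
      by_cases hvc : dep.contains u = true
      · -- skip: u already visited
        simp only [pvBfsA, pvBfsB, hcont, hvc, if_pos]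
        exact ih order vis dep tot QA' QB' hinv hq'
      · have hvc' : dep.contains u = false := by
          cases h : dep.contains u with
          | true => exact absurd h hvc
          | false => rfl
        have hunk : u ∉ dep.keys := fun hk => hvc ((PySem.Dict.contains_iff_mem_keys _ _).mpr hk)
        have hpne : p ≠ u := fun h => hunk (h ▸ (PySem.Dict.contains_iff_mem_keys _ _).mp hpc)
        -- components of the new invariant
        have hkeys' : (dep.insert u d).keys = v :: (order ++ [(u, p)]).map Prod.fst := by
          rw [PySem.Dict.keys_insert_of_not_contains _ _ hvc', hinv.keys]
          simp
        have hnotin : u ∉ v :: order.map Prod.fst := by rw [← hinv.keys]; exact hunk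
        have hnd' : (v :: (order ++ [(u, p)]).map Prod.fst).Nodup := by
          simp only [List.map_append, List.map_cons, List.map_nil]
          rw [show v :: (List.map Prod.fst order ++ [u])
              = (v :: List.map Prod.fst order) ++ [u] from rfl]
          refine List.Nodup.append hinv.nd (List.nodup_singleton _) ?_
          intro x hx hx1
          rw [List.mem_singleton] at hx1
          subst hx1
          exact hnotin hx
        have hgetD_pres : ∀ x, x ≠ u → (dep.insert u d).getD x 0 = dep.getD x 0 := by
          intro x hx; exact PySem.Dict.getD_insert_of_ne _ _ _ hx
        have hmemk : ∀ e ∈ order, e.1 ≠ u ∧ e.2 ≠ u := by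
          intro e he
          have hpm := pvParOK_mem hinv.par e (List.mem_reverse.mpr he)
          constructor
          · intro h1
            exact hnotin (List.mem_cons_of_mem _ (h1 ▸ List.mem_map_of_mem he))
          · intro h2
            rcases hpm with h3 | h3
            · exact hnotin (by rw [← h2, h3]; exact List.mem_cons_self)
            · rw [List.map_reverse, List.mem_reverse] at h3
              exact hnotin (List.mem_cons_of_mem _ (h2 ▸ h3))
        have hinv' : pvInv v V (order ++ [(u, p)])
            (vis.insert u ((if u ∈ V then 1 else 0 : Int), (0 : Int))) (dep.insert u d)
            (if u ∈ V then tot + d else tot) := by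
          refine ⟨hkeys', hnd', ?_, ?_, ?_, ?_, ?_⟩
          · intro x
            by_cases hx : x = u
            · subst hx
              rw [PySem.Dict.get?_insert_self, PySem.Dict.get?_insert_self]
              simp [pvInd]
            · rw [PySem.Dict.get?_insert_of_ne _ _ hx, PySem.Dict.get?_insert_of_ne _ _ hx]
              exact hinv.visq x
          · have hvne : v ≠ u := fun h => hnotin (h ▸ List.mem_cons_self)
            rw [hgetD_pres v hvne]; exact hinv.d0
          · intro e he
            rcases List.mem_append.mp he with he' | he'
            · obtain ⟨h1, h2⟩ := hmemk e he'
              rw [hgetD_pres e.1 h1, hgetD_pres e.2 h2]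
              exact hinv.ord e he'
            · rw [List.mem_singleton] at he'
              subst he'
              rw [PySem.Dict.getD_insert_self, hgetD_pres p hpne]
              exact hd
          · rw [List.reverse_append]
            simp only [List.reverse_singleton, List.singleton_append]
            refine ⟨?_, hinv.par⟩
            have hpk : p ∈ dep.keys := (PySem.Dict.contains_iff_mem_keys _ _).mp hpc
            rw [hinv.keys] at hpk
            rcases List.mem_cons.mp hpk with h1 | h1
            · exact Or.inl h1
            · exact Or.inr (by rw [List.map_reverse, List.mem_reverse]; exact h1)
          · rw [PySem.Dict.items_insert_of_not_contains _ _ hvc']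
            rw [List.map_append, List.sum_append, ← hinv.tots]
            simp only [List.map_cons, List.map_nil, List.sum_cons, List.sum_nil]
            unfold pvInd
            by_cases hu : u ∈ V <;> simp [hu]
        -- unfold one loop step on both sides
        simp only [pvBfsA, pvBfsB, hcont, hvc', Bool.false_eq_true, if_false]
        cases hadj : (PySem.Dict.mk G).get? u with
        | none =>
          simp only []
          exact pvFinalEq hinv'
        | some adj =>
          simp only []
          apply ih _ _ _ _ _ _ hinv'
          apply List.rel_append
          · -- old entries: dep.insert u d preserves their parents' lookups
            apply List.Forall₂.imp ?_ hq'
            intro x y hxy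
            obtain ⟨h1, q, h2, h3, h4⟩ := hxy
            have hqne : q ≠ u := fun h => hunk (h ▸ (PySem.Dict.contains_iff_mem_keys _ _).mp h3)
            refine ⟨h1, q, h2, ?_, ?_⟩
            · rw [PySem.Dict.contains_insert]; simp [h3]
            · rw [hgetD_pres q hqne]; exact h4
          · -- new entries: parent u with depth d
            apply pvForall₂_map
            intro w _
            refine ⟨rfl, u, rfl, PySem.Dict.contains_insert_self _ _ _, ?_⟩
            rw [PySem.Dict.getD_insert_self]
  -- (end pvSim)

-- ===== VERDICT (by name: the statement is the Claim_ definition above) =====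
theorem get_lengths_to_root_spec : Claim_equal_get_lengths_to_root := by
  intro G v V visited _ _
  unfold Spec_get_lengths_to_root get_lengths_to_root get_lengths_to_root_alt
  -- first iteration: v is dequeued from the singleton queue and visited
  simp only [pvBfsA, pvBfsB, PySem.Dict.contains_empty, Bool.false_eq_true, if_false]
  have hinv1 : pvInv v V [] (PySem.Dict.empty.insert v ((if v ∈ V then 1 else 0 : Int), (0 : Int)))
      (PySem.Dict.empty.insert v 0) (if v ∈ V then 0 + 0 else 0) := by
    refine ⟨?_, ?_, ?_, ?_, ?_, ?_, ?_⟩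
    · rw [PySem.Dict.keys_insert_of_not_contains _ _ (PySem.Dict.contains_empty v)]; rfl
    · simp
    · intro x
      by_cases hx : x = v
      · subst hx
        rw [PySem.Dict.get?_insert_self, PySem.Dict.get?_insert_self]
        simp [pvInd]
      · rw [PySem.Dict.get?_insert_of_ne _ _ hx, PySem.Dict.get?_insert_of_ne _ _ hx]
        simp [PySem.Dict.get?_empty]
    · rw [PySem.Dict.getD_insert_self]
    · intro e he; cases he
    · trivial
    · rw [PySem.Dict.items_insert_of_not_contains _ _ (PySem.Dict.contains_empty v)]
      have hemp : (PySem.Dict.empty : PySem.Dict Int Int).items = [] := rfl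
      rw [hemp]
      by_cases hv : v ∈ V <;> simp [hv, pvInd]
  cases hadj : (PySem.Dict.mk G).get? v with
  | none =>
    simp only []
    exact pvFinalEq hinv1
  | some adj =>
    simp only []
    apply pvSim G V v _ _ _ _ _ _ _ hinv1
    simp only [List.nil_append]
    apply pvForall₂_map
    intro w _
    refine ⟨rfl, v, rfl, PySem.Dict.contains_insert_self _ _ _, ?_⟩
    rw [PySem.Dict.getD_insert_self]
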